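-- pv_equiv track=rewrite | github.com/zeun0725/Algorithm_Programmers | 2018_kakao/2018_kakao_5.py | hash_to_lower
-- ===== SOURCE A (Python) =====
-- def hash_to_lower(musics):
--     if '#' not in musics:
--         return musics
--     re_music = ''
--     for idx, music in enumerate(musics):
--         if musics[idx] == '#':
--             continue
--         if idx < len(musics)-1 and musics[idx+1] == '#':
--             re_music += music.lower()
--         else:
--             re_music += music
--     return re_music
-- ===== SOURCE B (Python) =====
-- def hash_to_lower(musics):
--     out = []
--     for ch in musics:
--         if ch == '#':
--             if out:
--                 out[-1] = out[-1].lower()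
--         else:
--             out.append(ch)
--     return ''.join(out)
-- ===== Notes on version B (the rewrite author's own statement) =====
-- stated objective: simpler
-- what changed: Replaces A's index-based look-ahead (peeking at musics[idx+1] and a separate '#'-membership pre-check) with a single look-behind pass that appends characters and, on '#', retroactively lowercases the last appended character.
import Mathlib
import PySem

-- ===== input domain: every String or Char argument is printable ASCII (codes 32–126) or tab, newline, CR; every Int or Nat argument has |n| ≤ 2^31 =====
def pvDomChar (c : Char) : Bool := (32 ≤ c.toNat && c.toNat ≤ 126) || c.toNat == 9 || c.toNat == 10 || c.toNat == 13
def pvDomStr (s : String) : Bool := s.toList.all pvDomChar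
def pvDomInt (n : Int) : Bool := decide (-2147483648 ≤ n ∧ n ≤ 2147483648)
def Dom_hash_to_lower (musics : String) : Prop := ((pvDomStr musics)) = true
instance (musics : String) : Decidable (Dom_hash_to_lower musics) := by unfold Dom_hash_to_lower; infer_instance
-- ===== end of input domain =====

-- B replaces A's index-based look-ahead (peek at musics[idx+1] plus a '#'-membership
-- pre-check) by a single look-behind pass that appends characters and, on '#',
-- retroactively lowercases the last appended character; objective: simpler.

-- ===== PORT A =====
def hash_to_lower (musics : String) : String :=
  if PySem.Str.isIn "#" musics = false then musics
  else
    let cs := musics.toList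
    String.ofList ((PySem.List.enumerate cs 0).foldl
      (fun re p =>
        if PySem.List.pyGetD cs p.1 ' ' = '#' then re
        else if p.1 < (cs.length : Int) - 1 ∧ PySem.List.pyGetD cs (p.1 + 1) ' ' = '#' then
          re ++ [PySem.Chars.lowerChar p.2]
        else re ++ [p.2])
      [])

-- ===== PORT B =====
-- Source B's list `out` with append / mutate-last is modelled back-to-front:
-- `out[-1]` is the head of the accumulator, `append` is cons, join reverses at the end.
def hash_to_lower_alt (musics : String) : String :=
  String.ofList ((musics.toList.foldl
    (fun out ch =>
      if ch = '#' then
        match out with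
        | [] => []
        | h :: t => PySem.Chars.lowerChar h :: t
      else ch :: out)
    []).reverse)

-- ===== PRECONDITION & SPEC =====
def Spec_hash_to_lower (musics : String) (out : String) : Prop := out = hash_to_lower_alt musics
instance (musics : String) (out : String) : Decidable (Spec_hash_to_lower musics out) := by unfold Spec_hash_to_lower; infer_instance

-- ===== CLAIM (what is proved, stated in full; the proofs are below) =====
def Claim_equal_hash_to_lower : Prop := ∀ (musics : String), Dom_hash_to_lower musics → Spec_hash_to_lower musics (hash_to_lower musics)

-- ===== LEMMAS AND PROOFS =====

-- Reference function: A's per-character rule, as structural recursion with one-step look-ahead.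
def fSpec : List Char → List Char
  | [] => []
  | c :: rest =>
    if c = '#' then fSpec rest
    else (if rest.head? = some '#' then PySem.Chars.lowerChar c else c) :: fSpec rest

def lowHead : List Char → List Char
  | [] => []
  | h :: t => PySem.Chars.lowerChar h :: t

theorem lower_idem (c : Char) :
    PySem.Chars.lowerChar (PySem.Chars.lowerChar c) = PySem.Chars.lowerChar c := by
  have eA : ('A').val.toNat = 65 := rfl
  have eZ : ('Z').val.toNat = 90 := rfl
  have ec : ∀ d : Char, d.toNat = d.val.toNat := fun _ => rfl
  simp only [PySem.Chars.lowerChar, PySem.Chars.isupper, Bool.and_eq_true, decide_eq_true_eq]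
  split_ifs with h1 h2 <;> try rfl
  exfalso
  have h65 : 65 ≤ c.val.toNat := by
    have := h1.1; rw [Char.le_def, UInt32.le_iff_toNat_le, eA] at this; exact this
  have h90 : c.val.toNat ≤ 90 := by
    have := h1.2; rw [Char.le_def, UInt32.le_iff_toNat_le, eZ] at this; exact this
  have hv : Nat.isValidChar (c.toNat + 32) := by left; rw [ec]; omega
  have ht : (Char.ofNat (c.toNat + 32)).toNat = c.toNat + 32 := by
    rw [Char.toNat_ofNat, if_pos hv]
  have h2' : (Char.ofNat (c.toNat + 32)).val.toNat ≤ 90 := by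
    have := h2.2; rw [Char.le_def, UInt32.le_iff_toNat_le, eZ] at this; exact this
  rw [← ec, ht, ec] at h2'
  omega

theorem lowHead_idem (r : List Char) : lowHead (lowHead r) = lowHead r := by
  cases r with
  | nil => rfl
  | cons h t => simp [lowHead, lower_idem]

-- B's loop, characterised: the fold equals fSpec (reversed) with the initial
-- accumulator's head possibly lowered when the segment starts with '#'.
theorem altLoop (cs : List Char) : ∀ r : List Char,
    cs.foldl
      (fun out ch =>
        if ch = '#' then
          match out with
          | [] => []
          | h :: t => PySem.Chars.lowerChar h :: t
        else ch :: out) r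
    = (fSpec cs).reverse ++ (if cs.head? = some '#' then lowHead r else r) := by
  induction cs with
  | nil => intro r; simp [fSpec]
  | cons c rest ih =>
    intro r
    by_cases hc : c = '#'
    · subst hc
      have hm : (match r with
          | [] => ([] : List Char)
          | h :: t => PySem.Chars.lowerChar h :: t) = lowHead r := by cases r <;> rfl
      simp only [List.foldl_cons, hm, ih]
      by_cases hr : rest.head? = some '#'
      · simp [fSpec, hr, lowHead_idem]
      · simp [fSpec, hr]
    · have hstep : (if c = '#' then
          match r with
          | [] => ([] : List Char)
          | h :: t => PySem.Chars.lowerChar h :: t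
        else c :: r) = c :: r := by simp [hc]
      simp only [List.foldl_cons, hstep, ih]
      by_cases hr : rest.head? = some '#'
      · simp [fSpec, hc, hr, lowHead]
      · simp [fSpec, hc, hr]

theorem alt_eq_fSpec (musics : String) :
    hash_to_lower_alt musics = String.ofList (fSpec musics.toList) := by
  unfold hash_to_lower_alt
  rw [altLoop]
  by_cases hr : musics.toList.head? = some '#' <;> simp [hr, lowHead]

-- getD facts for the split cs = pre ++ c :: rest
theorem getD_split (pre rest : List Char) (c d : Char) :
    (pre ++ c :: rest).getD pre.length d = c := by
  rw [List.getD_append_right _ _ _ _ (le_refl _)]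
  simp

theorem getD_split_succ (pre rest : List Char) (c d : Char) :
    (pre ++ c :: rest).getD (pre.length + 1) d = rest.getD 0 d := by
  rw [List.getD_append_right _ _ _ _ (by omega)]
  simp [List.getD]

-- A's loop over enumerate, characterised segment-wise: processing the suffix `suf`
-- of cs = pre ++ suf starting at index pre.length appends fSpec suf.
theorem aLoop (cs : List Char) : ∀ (suf pre acc : List Char), pre ++ suf = cs →
    (PySem.List.enumerate suf (pre.length : Int)).foldl
      (fun re p =>
        if PySem.List.pyGetD cs p.1 ' ' = '#' then re
        else if p.1 < (cs.length : Int) - 1 ∧ PySem.List.pyGetD cs (p.1 + 1) ' ' = '#' then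
          re ++ [PySem.Chars.lowerChar p.2]
        else re ++ [p.2])
      acc
    = acc ++ fSpec suf := by
  intro suf
  induction suf with
  | nil => intro pre acc _; simp [PySem.List.enumerate_nil, fSpec]
  | cons c rest ih =>
    intro pre acc hsplit
    rw [PySem.List.enumerate_cons, List.foldl_cons]
    have hcast : ((pre.length : Int) + 1) = (((pre ++ [c]).length : Nat) : Int) := by
      simp
    have hsplit' : (pre ++ [c]) ++ rest = cs := by rw [← hsplit]; simp
    have hrec : ∀ acc' : List Char,
        (PySem.List.enumerate rest (((pre ++ [c]).length : Nat) : Int)).foldl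
          (fun re p =>
            if PySem.List.pyGetD cs p.1 ' ' = '#' then re
            else if p.1 < (cs.length : Int) - 1 ∧ PySem.List.pyGetD cs (p.1 + 1) ' ' = '#' then
              re ++ [PySem.Chars.lowerChar p.2]
            else re ++ [p.2])
          acc'
        = acc' ++ fSpec rest := fun acc' => ih (pre ++ [c]) acc' hsplit'
    have hget : PySem.List.pyGetD cs ((pre.length : Nat) : Int) ' ' = c := by
      rw [PySem.List.pyGetD_natCast, ← hsplit, getD_split]
    by_cases hc : c = '#'
    · -- continue branch
      simp only [hget, hc, if_true]
      rw [hcast, hrec]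
      simp [fSpec]
    · simp only [hget, if_neg hc]
      have hget1 : PySem.List.pyGetD cs ((pre.length : Int) + 1) ' ' = rest.getD 0 ' ' := by
        have : ((pre.length : Int) + 1) = (((pre.length + 1 : Nat)) : Int) := by push_cast; ring
        rw [this, PySem.List.pyGetD_natCast, ← hsplit, getD_split_succ]
      cases rest with
      | nil =>
        have hlen : cs.length = pre.length + 1 := by rw [← hsplit]; simp
        have hcond : ¬ ((pre.length : Int) < (cs.length : Int) - 1 ∧
            PySem.List.pyGetD cs ((pre.length : Int) + 1) ' ' = '#') := by
          rintro ⟨h, _⟩; rw [hlen] at h; push_cast at h; omega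
        rw [if_neg hcond, hcast, hrec]
        simp [fSpec, hc]
      | cons r0 rr =>
        have hlen : cs.length = pre.length + 2 + rr.length := by rw [← hsplit]; simp; omega
        have hlt : (pre.length : Int) < (cs.length : Int) - 1 := by rw [hlen]; push_cast; omega
        by_cases hr0 : r0 = '#'
        · have : ((pre.length : Int) < (cs.length : Int) - 1 ∧
              PySem.List.pyGetD cs ((pre.length : Int) + 1) ' ' = '#') := by
            exact ⟨hlt, by rw [hget1]; simpa [List.getD] using hr0⟩
          rw [if_pos this, hcast, hrec]
          simp [fSpec, hc, hr0]
        · have : ¬ ((pre.length : Int) < (cs.length : Int) - 1 ∧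
              PySem.List.pyGetD cs ((pre.length : Int) + 1) ' ' = '#') := by
            rintro ⟨_, h⟩; rw [hget1] at h; simp [List.getD] at h; exact hr0 h
          rw [if_neg this, hcast, hrec]
          simp [fSpec, hc, hr0]

theorem fSpec_no_hash (cs : List Char) (h : '#' ∉ cs) : fSpec cs = cs := by
  induction cs with
  | nil => rfl
  | cons c rest ih =>
    have hc : c ≠ '#' := fun hh => h (by simp [hh])
    have hrest : '#' ∉ rest := fun hh => h (by simp [hh])
    have hhead : rest.head? ≠ some '#' := by
      intro hh
      exact hrest (List.mem_of_mem_head? (by rw [hh]; simp))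
    simp [fSpec, hc, hhead, ih hrest]

-- ===== VERDICT (by name: the statement is the Claim_ definition above) =====
theorem hash_to_lower_spec : Claim_equal_hash_to_lower := by
  intro musics _
  unfold Spec_hash_to_lower
  rw [alt_eq_fSpec]
  unfold hash_to_lower
  by_cases hin : PySem.Str.isIn "#" musics = false
  · rw [if_pos hin]
    have hmem : '#' ∉ musics.toList := by
      intro hmem
      have : PySem.Chars.isIn "#".toList musics.toList = true := by
        rw [PySem.Chars.isIn_iff_infix]
        obtain ⟨a, b, hab⟩ := List.mem_iff_append.mp hmem
        exact ⟨a, b, by rw [hab]; simp⟩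
      simp only [← PySem.Str.isIn_eq] at this
      rw [hin] at this
      exact Bool.false_ne_true this
    rw [fSpec_no_hash _ hmem]
    simp
  · rw [if_neg hin]
    have h0 : ((([] : List Char).length : Nat) : Int) = 0 := by simp
    have := aLoop musics.toList musics.toList [] [] (by simp)
    rw [h0] at this
    simp only [this, List.nil_append]
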